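-- pv_equiv track=rewrite | github.com/elitcloud/elit | elit/util/string.py | collapse_digits
-- ===== SOURCE A (Python) =====
-- def is_range(c, begin, end):
--     return begin <= c <= end
--
-- def is_hyphen(c):
--     return c == '-' or is_range(c, u'\u2010', u'\u2014')
--
-- def is_currency(c):
--     return c == '$' or is_range(c, u'\u00A2', u'\u00A5') or is_range(c, u'\u20A0', u'\u20CF')
--
-- def collapse_digits(s):
--     def get(i, c):
--         if i+1 < len(s) and digits[i+1]:
--             if is_currency(c) or c in {'.', '-', '+', '#'}:
--                 return ''
--             if i-1 >= 0 and digits[i-1] and (is_hyphen(c) or c in {',', ':', '/', '='}):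
--                 return ''
--         elif i-1 >= 0 and digits[i-1]:
--             if c == '%':
--                 return ''
--         elif digits[i]:
--             if t and t[0] == '0':
--                 return ''
--
--         t[0] = '0' if digits[i] else c
--         return t[0]
--
--     t = ['']
--     digits = [c.isdigit() for c in s]
--     return ''.join([get(i, c) for i, c in enumerate(s)])
-- ===== SOURCE B (Python) =====
-- def collapse_digits(s):
--     DROP, ZERO, COND = 0, 1, 2  # other tokens are the literal character to keep
--     n = len(s)
--     digits = [c.isdigit() for c in s]
--
--     def classify(i, c):
--         nxt = i + 1 < n and digits[i + 1]
--         prv = i - 1 >= 0 and digits[i - 1]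
--         if digits[i]:
--             return ZERO if (nxt or prv) else COND
--         if nxt and (c == '$' or '\u00A2' <= c <= '\u00A5' or '\u20A0' <= c <= '\u20CF'
--                     or c in '.-+#'):
--             return DROP
--         if nxt and prv and (c == '-' or '\u2010' <= c <= '\u2014' or c in ',:/='):
--             return DROP
--         if prv and not nxt and c == '%':
--             return DROP
--         return c
--
--     toks = [classify(i, c) for i, c in enumerate(s)]
--     out = []
--     last = ''
--     for tok in toks:
--         if tok == DROP:
--             continue
--         if tok == ZERO:
--             last = '0'
--         elif tok == COND:
--             if last == '0':
--                 continue
--             last = '0'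
--         else:
--             last = tok
--         out.append(last)
--     return ''.join(out)
-- ===== Notes on version B (the rewrite author's own statement) =====
-- stated objective: alternative
-- what changed: A interleaves the context rules with emission inside one stateful closure over a mutable one-cell list; B first classifies every position into drop/zero/conditional-zero/keep tokens from the digit-neighbour pattern alone, then a plain second pass emits the tokens while tracking the last emitted character.
import Mathlib
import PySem

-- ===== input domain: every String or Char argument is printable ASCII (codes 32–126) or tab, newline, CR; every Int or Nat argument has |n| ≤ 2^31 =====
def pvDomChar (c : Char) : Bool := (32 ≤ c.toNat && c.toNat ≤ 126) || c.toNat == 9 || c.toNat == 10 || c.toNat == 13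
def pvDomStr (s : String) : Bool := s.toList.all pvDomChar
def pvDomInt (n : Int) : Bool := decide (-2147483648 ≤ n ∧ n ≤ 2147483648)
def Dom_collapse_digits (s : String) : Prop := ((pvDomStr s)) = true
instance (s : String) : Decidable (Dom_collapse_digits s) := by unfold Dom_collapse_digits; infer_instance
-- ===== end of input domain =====

-- B is an alternative decomposition (classify each index, then a plain emit pass), same values as A.

-- ===== PORT A =====
def pvIsRange (c b e : Char) : Bool := decide (b ≤ c) && decide (c ≤ e)

def pvIsHyphen (c : Char) : Bool := c == '-' || pvIsRange c (Char.ofNat 0x2010) (Char.ofNat 0x2014)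

def pvIsCurrency (c : Char) : Bool :=
  c == '$' || pvIsRange c (Char.ofNat 0xA2) (Char.ofNat 0xA5) || pvIsRange c (Char.ofNat 0x20A0) (Char.ofNat 0x20CF)

-- Python's `t` is a one-element list used as a mutable cell (always truthy), ported as the String it holds.
-- pvGet i c t = (string returned by get(i, c), cell t[0] afterwards)
def pvGet (s : List Char) (digits : List Bool) (i : Int) (c : Char) (t : String) : String × String :=
  let assign : String × String :=
    let t' := if PySem.List.pyGetD digits i false then "0" else String.ofList [c]
    (t', t')
  if i + 1 < (s.length : Int) ∧ PySem.List.pyGetD digits (i + 1) false = true then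
    if pvIsCurrency c || ['.', '-', '+', '#'].contains c then ("", t)
    else if 0 ≤ i - 1 ∧ PySem.List.pyGetD digits (i - 1) false = true ∧
            (pvIsHyphen c || [',', ':', '/', '='].contains c) then ("", t)
    else assign
  else if 0 ≤ i - 1 ∧ PySem.List.pyGetD digits (i - 1) false = true then
    if c == '%' then ("", t) else assign
  else if PySem.List.pyGetD digits i false then
    if t == "0" then ("", t) else assign
  else assign

def pvStepA (cs : List Char) (digits : List Bool) (st : List String × String) (ic : Int × Char) :
    List String × String :=
  let r := pvGet cs digits ic.1 ic.2 st.2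
  (st.1 ++ [r.1], r.2)

def collapse_digits (s : String) : String :=
  let cs := s.toList
  let digits := cs.map PySem.Chars.isdigit
  let res := (PySem.List.enumerate cs).foldl (pvStepA cs digits) ([], "")
  PySem.Str.join "" res.1

-- ===== PORT B =====
inductive PVTok : Type
  | drop
  | zero
  | cond
  | keep : Char → PVTok
deriving DecidableEq, Repr

def pvClassify (digits : List Bool) (n : Int) (i : Int) (c : Char) : PVTok :=
  let nxt : Bool := decide (i + 1 < n) && PySem.List.pyGetD digits (i + 1) false
  let prv : Bool := decide (0 ≤ i - 1) && PySem.List.pyGetD digits (i - 1) false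
  if PySem.List.pyGetD digits i false then (if nxt || prv then .zero else .cond)
  else if nxt && (c == '$' || (decide (Char.ofNat 0xA2 ≤ c) && decide (c ≤ Char.ofNat 0xA5))
                || (decide (Char.ofNat 0x20A0 ≤ c) && decide (c ≤ Char.ofNat 0x20CF))
                || ['.', '-', '+', '#'].contains c) then .drop
  else if nxt && prv && (c == '-' || (decide (Char.ofNat 0x2010 ≤ c) && decide (c ≤ Char.ofNat 0x2014))
                || [',', ':', '/', '='].contains c) then .drop
  else if prv && !nxt && c == '%' then .drop
  else .keep c

def pvStepB (st : List String × String) (tok : PVTok) : List String × String :=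
  match tok with
  | .drop => st
  | .zero => (st.1 ++ ["0"], "0")
  | .cond => if st.2 == "0" then st else (st.1 ++ ["0"], "0")
  | .keep c => (st.1 ++ [String.ofList [c]], String.ofList [c])

def collapse_digits_alt (s : String) : String :=
  let cs := s.toList
  let digits := cs.map PySem.Chars.isdigit
  let toks := (PySem.List.enumerate cs).map (fun ic => pvClassify digits (cs.length : Int) ic.1 ic.2)
  let res := toks.foldl pvStepB ([], "")
  PySem.Str.join "" res.1

-- ===== PRECONDITION & SPEC =====
def Spec_collapse_digits (s : String) (out : String) : Prop := out = collapse_digits_alt s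
instance (s : String) (out : String) : Decidable (Spec_collapse_digits s out) := by unfold Spec_collapse_digits; infer_instance

-- ===== CLAIM (what is proved, stated in full; the proofs are below) =====
def Claim_equal_collapse_digits : Prop := ∀ (s : String), Dom_collapse_digits s → Spec_collapse_digits s (collapse_digits s)

-- ===== LEMMAS AND PROOFS =====

-- List.intercalate with an empty separator is flatten (used to push Str.join over ++).
theorem pv_intercalate_nil (xs : List (List Char)) : List.intercalate [] xs = xs.flatten := by
  induction xs with
  | nil => rfl
  | cons a xs ih => cases xs <;> simp_all [List.intercalate]

theorem pv_join_append (l m : List String) :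
    PySem.Str.join "" (l ++ m) = PySem.Str.join "" l ++ PySem.Str.join "" m := by
  simp [PySem.Str.join, PySem.Chars.join, pv_intercalate_nil]

theorem pv_join_singleton (x : String) : PySem.Str.join "" [x] = x := by
  simp [PySem.Str.join, PySem.Chars.join, pv_intercalate_nil]

-- pvStepB only ever appends to the accumulator.
theorem pvStepB_acc (acc : List String) (t : String) (tok : PVTok) :
    pvStepB (acc, t) tok = (acc ++ (pvStepB ([], t) tok).1, (pvStepB ([], t) tok).2) := by
  cases tok <;> simp only [pvStepB] <;> (try split_ifs) <;> simp

-- A digit character is none of the special punctuation/currency characters of the rules.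
theorem pv_isdigit_range (c : Char) (h : PySem.Chars.isdigit c = true) : '0' ≤ c ∧ c ≤ '9' := by
  simpa [PySem.Chars.isdigit] using h

theorem pv_digit_not_between (c lo hi : Char) (h : PySem.Chars.isdigit c = true)
    (hlo : '9' < lo) : ¬ (lo ≤ c ∧ c ≤ hi) :=
  fun hab => absurd (pv_isdigit_range c h).2 (not_le.mpr (lt_of_lt_of_le hlo hab.1))

theorem pv_digit_ne (c d : Char) (h : PySem.Chars.isdigit c = true)
    (hd : PySem.Chars.isdigit d = false) : ¬ c = d := by
  intro e; subst e; simp [h] at hd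

-- One step of A equals one step of B, whenever digits[i] is the digit-ness of c
-- (which holds for every (i, c) drawn from enumerate s with digits = map isdigit s).
set_option maxHeartbeats 2000000 in
theorem pv_step_eq (cs : List Char) (digits : List Bool) (i : Int) (c : Char) (t : String)
    (hdi : PySem.List.pyGetD digits i false = PySem.Chars.isdigit c) :
    pvStepB ([], t) (pvClassify digits (cs.length : Int) i c) =
      ((if (pvGet cs digits i c t).1 = "" then [] else [(pvGet cs digits i c t).1]),
        (pvGet cs digits i c t).2) := by
  unfold pvGet pvClassify pvStepB pvIsCurrency pvIsHyphen pvIsRange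
  rw [hdi]
  generalize PySem.List.pyGetD digits (i + 1) false = dn
  generalize PySem.List.pyGetD digits (i - 1) false = dp
  by_cases hc : PySem.Chars.isdigit c = true
  · have f1 := pv_digit_not_between c (Char.ofNat 162) (Char.ofNat 165) hc (by decide)
    have f2 := pv_digit_not_between c (Char.ofNat 8352) (Char.ofNat 8399) hc (by decide)
    have f3 := pv_digit_not_between c (Char.ofNat 8208) (Char.ofNat 8212) hc (by decide)
    have g1 := pv_digit_ne c '$' hc (by decide)
    have g2 := pv_digit_ne c '.' hc (by decide)
    have g3 := pv_digit_ne c '-' hc (by decide)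
    have g4 := pv_digit_ne c '+' hc (by decide)
    have g5 := pv_digit_ne c '#' hc (by decide)
    have g6 := pv_digit_ne c '%' hc (by decide)
    have g7 := pv_digit_ne c ',' hc (by decide)
    have g8 := pv_digit_ne c ':' hc (by decide)
    have g9 := pv_digit_ne c '/' hc (by decide)
    have g10 := pv_digit_ne c '=' hc (by decide)
    by_cases hn : i + 1 < (cs.length : Int) <;>
    by_cases hp : (1:Int) ≤ i <;>
    cases dn <;> cases dp <;>
    simp [hn, hp, hc, f1, f2, f3, g1, g2, g3, g4, g5, g6, g7, g8, g9, g10] <;>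
    (try split_ifs) <;> simp_all
  · by_cases hn : i + 1 < (cs.length : Int) <;>
    by_cases hp : (1:Int) ≤ i <;>
    cases dn <;> cases dp <;>
    simp [hn, hp, hc] <;> (try split_ifs) <;> simp_all

theorem pv_fold_eq (cs : List Char) (digits : List Bool) (l : List (Int × Char))
    (accA accB : List String) (t : String)
    (hd : ∀ p ∈ l, PySem.List.pyGetD digits p.1 false = PySem.Chars.isdigit p.2)
    (h : PySem.Str.join "" accA = PySem.Str.join "" accB) :
    PySem.Str.join "" ((l.foldl (pvStepA cs digits) (accA, t)).1) =
      PySem.Str.join ""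
        (((l.map (fun ic => pvClassify digits (cs.length : Int) ic.1 ic.2)).foldl pvStepB (accB, t)).1) := by
  induction l generalizing accA accB t with
  | nil => simpa using h
  | cons p l ih =>
    obtain ⟨i, c⟩ := p
    have hs := pv_step_eq cs digits i c t (hd (i, c) (List.mem_cons_self))
    simp only [List.foldl_cons, List.map_cons]
    have hA : pvStepA cs digits (accA, t) (i, c) =
        (accA ++ [(pvGet cs digits i c t).1], (pvGet cs digits i c t).2) := rfl
    rw [hA, pvStepB_acc, hs]
    apply ih _ _ _ (fun p hp => hd p (List.mem_cons_of_mem _ hp))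
    by_cases he : (pvGet cs digits i c t).1 = "" <;>
      simp [he, pv_join_append, pv_join_singleton, h]

theorem pv_digits_at (cs : List Char) :
    ∀ p ∈ PySem.List.enumerate cs,
      PySem.List.pyGetD (cs.map PySem.Chars.isdigit) p.1 false = PySem.Chars.isdigit p.2 := by
  intro p hp
  rw [PySem.List.mem_enumerate_iff] at hp
  obtain ⟨k, hk, rfl⟩ := hp
  simp [PySem.List.pyGetD_natCast, List.getD_eq_getElem?_getD, hk]

-- ===== VERDICT (by name: the statement is the Claim_ definition above) =====
set_option maxHeartbeats 8000000 in
theorem collapse_digits_spec : Claim_equal_collapse_digits := by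
  intro s _
  unfold Spec_collapse_digits collapse_digits collapse_digits_alt
  exact pv_fold_eq _ _ _ [] [] "" (pv_digits_at s.toList) rfl
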